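-- pv_equiv track=rewrite | github.com/robert-nicol-de/voxcore | backend/enterprise/data_classification.py | apply_masking
-- ===== SOURCE A (Python) =====
-- def apply_masking(value: str, mask_format: str) -> str:
--     """Apply mask format to value"""
--     if not value or not mask_format:
--         return value
--
--     # Simple implementation - can be enhanced
--     # For SSN: "123456789" + "XXX-XX-XXXX" = "123-45-XXXX"
--     result = ""
--     value_idx = 0
--     for char in mask_format:
--         if char == 'X':
--             result += '*' if value_idx >= len(value) else value[value_idx]
--             value_idx += 1
--         else:
--             result += char
--
--     return result
-- ===== SOURCE B (Python) =====
-- def apply_masking(value: str, mask_format: str) -> str: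
--     """Apply mask format to value"""
--     if not value or not mask_format:
--         return value
--     x_positions = [i for i, c in enumerate(mask_format) if c == 'X']
--     result = list(mask_format)
--     for j, pos in enumerate(x_positions):
--         result[pos] = value[j] if j < len(value) else '*'
--     return ''.join(result)
-- ===== Notes on version B (the rewrite author's own statement) =====
-- stated objective: alternative
-- what changed: Replaced the single interleaved string-building pass with a two-pass index-then-scatter structure: first collect the indices of 'X' in the mask, then write value[j] (or '*' past the end of value) into a list copy of the mask at those positions.
import Mathlib
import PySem

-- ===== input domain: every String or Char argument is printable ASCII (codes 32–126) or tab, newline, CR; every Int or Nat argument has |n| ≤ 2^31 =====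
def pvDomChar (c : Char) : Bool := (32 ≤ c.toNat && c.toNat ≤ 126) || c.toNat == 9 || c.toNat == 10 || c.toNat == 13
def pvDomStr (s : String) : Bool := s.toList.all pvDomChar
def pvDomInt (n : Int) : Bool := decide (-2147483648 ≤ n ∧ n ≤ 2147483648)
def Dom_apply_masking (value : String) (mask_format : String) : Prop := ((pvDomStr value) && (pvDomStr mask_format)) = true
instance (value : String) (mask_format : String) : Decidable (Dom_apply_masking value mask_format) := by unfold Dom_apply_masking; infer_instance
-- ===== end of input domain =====

-- B replaces A's single interleaved pass (string concatenation with a running value cursor)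
-- by a two-pass index-then-scatter structure: collect the 'X' positions, then write value
-- characters into a list copy of the mask; objective: alternative decomposition, same cost class.


-- ===== PORT A =====
-- literal port of A: one fold over the mask characters carrying (result, value_idx)
def apply_masking (value : String) (mask_format : String) : String :=
  if value = "" || mask_format = "" then value
  else
    let v := value.toList
    String.mk ((mask_format.toList.foldl
      (fun (st : List Char × Nat) c =>
        if c = 'X' then
          (st.1 ++ [if v.length ≤ st.2 then '*' else v.getD st.2 '*'], st.2 + 1)
        else (st.1 ++ [c], st.2))
      (([] : List Char), 0)).1)

-- ===== PORT B =====
-- [i for i, c in enumerate(mask_format) if c == 'X']  (counter i starts at 0)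
def pvXposB (m : List Char) (i : Nat) : List Nat :=
  match m with
  | [] => []
  | c :: cs => if c = 'X' then i :: pvXposB cs (i + 1) else pvXposB cs (i + 1)

-- for j, pos in enumerate(x_positions): result[pos] = value[j] if j < len(value) else '*'
def pvScatterB (v : List Char) (res : List Char) (ps : List Nat) (j : Nat) : List Char :=
  match ps with
  | [] => res
  | p :: rest =>
      pvScatterB v (res.set p (if j < v.length then v.getD j '*' else '*')) rest (j + 1)

def apply_masking_alt (value : String) (mask_format : String) : String :=
  if value = "" || mask_format = "" then value
  else
    let v := value.toList
    let m := mask_format.toList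
    String.mk (pvScatterB v m (pvXposB m 0) 0)

-- ===== PRECONDITION & SPEC =====
def Spec_apply_masking (value : String) (mask_format : String) (out : String) : Prop := out = apply_masking_alt value mask_format
instance (value : String) (mask_format : String) (out : String) : Decidable (Spec_apply_masking value mask_format out) := by unfold Spec_apply_masking; infer_instance

-- ===== CLAIM (what is proved, stated in full; the proofs are below) =====
def Claim_equal_apply_masking : Prop := ∀ (value : String) (mask_format : String), Dom_apply_masking value mask_format → Spec_apply_masking value mask_format (apply_masking value mask_format)

-- ===== LEMMAS AND PROOFS =====

-- common characterisation of the masked string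
def pvFill (v : List Char) (m : List Char) (j : Nat) : List Char :=
  match m with
  | [] => []
  | c :: cs =>
      if c = 'X' then (if j < v.length then v.getD j '*' else '*') :: pvFill v cs (j + 1)
      else c :: pvFill v cs j

lemma pv_foldA (v : List Char) : ∀ (m acc : List Char) (j : Nat),
    (m.foldl
      (fun (st : List Char × Nat) c =>
        if c = 'X' then
          (st.1 ++ [if v.length ≤ st.2 then '*' else v.getD st.2 '*'], st.2 + 1)
        else (st.1 ++ [c], st.2))
      (acc, j)).1 = acc ++ pvFill v m j := by
  intro m
  induction m with
  | nil => intro acc j; simp [pvFill]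
  | cons c cs ih =>
      intro acc j
      rw [List.foldl_cons]
      by_cases h : c = 'X'
      · rw [if_pos h, ih]
        simp [pvFill, h]
        split_ifs <;> first | rfl | omega
      · rw [if_neg h, ih]
        simp [pvFill, h]

lemma pv_xpos_succ : ∀ (m : List Char) (i : Nat),
    pvXposB m (i + 1) = (pvXposB m i).map (· + 1) := by
  intro m
  induction m with
  | nil => intro i; simp [pvXposB]
  | cons c cs ih =>
      intro i
      by_cases h : c = 'X' <;> simp [pvXposB, h, ih]

lemma pv_scatter_shift (v : List Char) : ∀ (ps : List Nat) (a : Char) (res : List Char) (j : Nat),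
    pvScatterB v (a :: res) (ps.map (· + 1)) j = a :: pvScatterB v res ps j := by
  intro ps
  induction ps with
  | nil => intro a res j; simp [pvScatterB]
  | cons p rest ih =>
      intro a res j
      simp [pvScatterB, ih]

lemma pv_scatter_eq_fill (v : List Char) : ∀ (m : List Char) (j : Nat),
    pvScatterB v m (pvXposB m 0) j = pvFill v m j := by
  intro m
  induction m with
  | nil => intro j; simp [pvXposB, pvScatterB, pvFill]
  | cons c cs ih =>
      intro j
      by_cases h : c = 'X'
      · simp [pvXposB, h, pvFill, pvScatterB, pv_xpos_succ, pv_scatter_shift, ih]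
      · simp [pvXposB, h, pvFill, pv_xpos_succ, pv_scatter_shift, ih]

-- ===== VERDICT (by name: the statement is the Claim_ definition above) =====
theorem apply_masking_spec : Claim_equal_apply_masking := by
  intro value mask_format _
  unfold Spec_apply_masking apply_masking apply_masking_alt
  by_cases h : value = "" || mask_format = ""
  · simp [h]
  · simp only [h, Bool.false_eq_true, if_false]
    exact congrArg String.mk
      ((pv_foldA value.toList mask_format.toList [] 0).trans
        (pv_scatter_eq_fill value.toList mask_format.toList 0).symm)
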